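-- pv_equiv track=rewrite | github.com/jw120/aoc-code | python/src/aoc_2024_22.py | best_price
-- ===== SOURCE A (Python) =====
-- def best_price(seq_prices: list[dict[tuple[int, int, int, int], int]]) -> int:
--     """Find best price from sequence-pricing maps."""
--     combined: dict[tuple[int, int, int, int], int] = seq_prices[0].copy()
--     for seq_price in seq_prices[1:]:
--         new_combined: dict[tuple[int, int, int, int], int] = {}
--         for sequence, price in combined.items():
--             new_combined[sequence] = price + seq_price.get(sequence, 0)
--         for sequence, price in seq_price.items():
--             if sequence not in new_combined:
--                 new_combined[sequence] = price
--         combined = new_combined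
--     return max(combined.values())
-- ===== SOURCE B (Python) =====
-- def best_price(seq_prices: list[dict[tuple[int, int, int, int], int]]) -> int:
--     """Find best price from sequence-pricing maps."""
--     all_keys = set(seq_prices[0])
--     for seq_price in seq_prices[1:]:
--         all_keys.update(seq_price.keys())
--     return max(sum(d.get(seq, 0) for d in seq_prices) for seq in all_keys)
-- ===== Notes on version B (the rewrite author's own statement) =====
-- stated objective: idiomatic
-- what changed: Instead of A's pairwise accumulation that rebuilds a combined dict per input map (copy-and-merge with a two-phase loop), B first collects the set of all candidate sequences and then, for each candidate, totals d.get(seq, 0) across all maps, taking the max of these per-key totals.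
import Mathlib
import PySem

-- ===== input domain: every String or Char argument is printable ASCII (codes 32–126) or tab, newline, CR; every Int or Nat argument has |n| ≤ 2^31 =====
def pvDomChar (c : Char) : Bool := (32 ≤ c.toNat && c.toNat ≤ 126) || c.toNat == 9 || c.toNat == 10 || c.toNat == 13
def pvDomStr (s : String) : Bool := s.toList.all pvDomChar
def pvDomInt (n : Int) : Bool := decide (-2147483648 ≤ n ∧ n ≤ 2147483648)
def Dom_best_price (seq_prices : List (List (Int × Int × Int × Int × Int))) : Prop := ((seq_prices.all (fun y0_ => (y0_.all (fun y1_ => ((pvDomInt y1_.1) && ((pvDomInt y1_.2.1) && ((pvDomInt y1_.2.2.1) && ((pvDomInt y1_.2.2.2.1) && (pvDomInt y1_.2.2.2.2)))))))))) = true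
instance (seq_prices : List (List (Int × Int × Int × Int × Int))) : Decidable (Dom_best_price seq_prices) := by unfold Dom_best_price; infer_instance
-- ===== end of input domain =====

-- B replaces A's per-map dict rebuilding with: collect the set of all keys, then total each key
-- across all maps and take the max (idiomatic; same cost). Equivalence proved on Pre_ below.

-- Each input dict[tuple[int,int,int,int], int] arrives as a flat 5-tuple list; both ports first
-- rebuild the Python dict (insertion order, last value wins) with PySem.Dict.
def pvKey (p : Int × Int × Int × Int × Int) : Int × Int × Int × Int := (p.1, p.2.1, p.2.2.1, p.2.2.2.1)
def pvVal (p : Int × Int × Int × Int × Int) : Int := p.2.2.2.2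
def pvToDict (l : List (Int × Int × Int × Int × Int)) : PySem.Dict (Int × Int × Int × Int) Int :=
  l.foldl (fun d p => d.insert (pvKey p) (pvVal p)) PySem.Dict.empty

-- ===== PORT A =====
def best_price (seq_prices : List (List (Int × Int × Int × Int × Int))) : Int :=
  match seq_prices.map pvToDict with
  | [] => 0          -- Python raises IndexError on seq_prices[0]; excluded by Pre_
  | d0 :: rest =>
    -- combined = seq_prices[0].copy(); for seq_price in seq_prices[1:]: …
    let combined := rest.foldl (fun combined seq_price =>
      -- new_combined = {}; for sequence, price in combined.items(): new_combined[sequence] = price + seq_price.get(sequence, 0)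
      -- for sequence, price in seq_price.items(): if sequence not in new_combined: new_combined[sequence] = price
      seq_price.items.foldl
        (fun nc kv => if nc.contains kv.1 then nc else nc.insert kv.1 kv.2)
        (combined.items.foldl
          (fun nc kv => nc.insert kv.1 (kv.2 + seq_price.getD kv.1 0)) PySem.Dict.empty)) d0
    -- max(combined.values())  (ValueError on no values: excluded by Pre_)
    (PySem.List.max? combined.values (fun x => x)).getD 0

-- ===== PORT B =====
def best_price_alt (seq_prices : List (List (Int × Int × Int × Int × Int))) : Int :=
  let ds := seq_prices.map pvToDict
  match ds with
  | [] => 0          -- Python raises IndexError on set(seq_prices[0]); excluded by Pre_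
  | d0 :: rest =>
    -- all_keys = set(seq_prices[0]); for seq_price in seq_prices[1:]: all_keys.update(seq_price.keys())
    let allKeys : PySem.Set (Int × Int × Int × Int) :=
      rest.foldl (fun s d => PySem.Set.update s d.keys) (PySem.Set.ofList d0.keys)
    -- max(sum(d.get(seq, 0) for d in seq_prices) for seq in all_keys)
    -- (a max of Int totals with no key: independent of the set's iteration order; ValueError on empty set excluded by Pre_)
    (PySem.List.max?
      (allKeys.map (fun k => ds.foldl (fun acc d => acc + d.getD k 0) 0)) (fun x => x)).getD 0

-- ===== PRECONDITION & SPEC =====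
-- Pre_ excludes exactly the inputs where Python A raises: the empty list (IndexError on
-- seq_prices[0]) and lists of only-empty dicts (ValueError from max of no values). B raises there too.
def Pre_best_price (seq_prices : List (List (Int × Int × Int × Int × Int))) : Prop :=
  seq_prices ≠ [] ∧ ∃ l ∈ seq_prices, l ≠ []
instance (seq_prices : List (List (Int × Int × Int × Int × Int))) : Decidable (Pre_best_price seq_prices) := by unfold Pre_best_price; infer_instance
def pvWitness_best_price : (List (List (Int × Int × Int × Int × Int))) := ([[(1, 2, 3, 4, 5)]])

def Spec_best_price (seq_prices : List (List (Int × Int × Int × Int × Int))) (out : Int) : Prop := out = best_price_alt seq_prices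
instance (seq_prices : List (List (Int × Int × Int × Int × Int))) (out : Int) : Decidable (Spec_best_price seq_prices out) := by unfold Spec_best_price; infer_instance

-- ===== CLAIM (what is proved, stated in full; the proofs are below) =====
def Claim_equal_best_price : Prop := ∀ (seq_prices : List (List (Int × Int × Int × Int × Int))), Dom_best_price seq_prices → Pre_best_price seq_prices → Spec_best_price seq_prices (best_price seq_prices)

-- ===== LEMMAS AND PROOFS =====

-- Set helpers
theorem pvSet_foldl_add_fresh {α : Type} [BEq α] [LawfulBEq α] (l : List α) (s : PySem.Set α)
    (hl : l.Nodup) (hs : ∀ x ∈ l, x ∉ s) : List.foldl PySem.Set.add s l = s ++ l := by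
  induction l generalizing s with
  | nil => simp
  | cons a t ih =>
    have ha : PySem.Set.add s a = s ++ [a] := by
      have : a ∉ s := hs a (by simp)
      simp [PySem.Set.add, PySem.Set.contains, this]
    rw [List.foldl_cons, ha, ih (s ++ [a]) hl.of_cons]
    · simp
    · intro x hx
      simp only [List.mem_append, List.mem_singleton]
      rintro (h | rfl)
      · exact hs x (List.mem_cons_of_mem _ hx) h
      · exact (List.nodup_cons.mp hl).1 hx

theorem pvSet_ofList_nodup {α : Type} [BEq α] [LawfulBEq α] (l : List α) (h : l.Nodup) :
    PySem.Set.ofList l = l := by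
  rw [PySem.Set.ofList_eq_foldl, pvSet_foldl_add_fresh l [] h (by simp)]; simp

theorem pvSet_update_nodup {α : Type} [BEq α] [LawfulBEq α] (l : List α) (s : PySem.Set α)
    (hs : s.Nodup) : (PySem.Set.update s l).Nodup := by
  induction l generalizing s with
  | nil => exact hs
  | cons a t ih =>
    show (List.foldl PySem.Set.add (PySem.Set.add s a) t).Nodup
    apply ih
    by_cases h : a ∈ s
    · simpa [PySem.Set.add, PySem.Set.contains, h] using hs
    · have ha : PySem.Set.add s a = s ++ [a] := by
        simp [PySem.Set.add, PySem.Set.contains, h]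
      rw [ha]
      refine List.Nodup.append hs (by simp) ?_
      intro x hx hxa
      simp only [List.mem_singleton] at hxa
      subst hxa
      exact h hx

-- the second inner loop of A's step (the "if sequence not in new_combined" loop)
theorem pv_setd_getD {κ : Type} [BEq κ] [LawfulBEq κ] [DecidableEq κ]
    (d : PySem.Dict κ Int) (l : List (κ × Int)) (c : PySem.Dict κ Int) (k : κ)
    (hv : ∀ kv ∈ l, d.get? kv.1 = some kv.2) :
    (l.foldl (fun nc kv => if nc.contains kv.1 then nc else nc.insert kv.1 kv.2) c).getD k 0
      = if c.contains k then c.getD k 0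
        else if k ∈ l.map Prod.fst then d.getD k 0 else c.getD k 0 := by
  induction l generalizing c with
  | nil => simp
  | cons a t ih =>
    have hv' : ∀ kv ∈ t, d.get? kv.1 = some kv.2 := fun kv h => hv kv (List.mem_cons_of_mem _ h)
    have hva : d.getD a.1 0 = a.2 := PySem.Dict.getD_of_get?_eq_some _ _ (hv a (by simp))
    rw [List.foldl_cons]
    by_cases hca : c.contains a.1
    · rw [if_pos hca, ih c hv']
      by_cases hck : c.contains k
      · simp [hck]
      · have hka : k ≠ a.1 := fun h => hck (h ▸ hca)
        have hmc : (k ∈ a.1 :: List.map Prod.fst t) = (k ∈ List.map Prod.fst t) := by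
          simp [List.mem_cons, hka]
        simp only [List.map_cons, hmc]
    · rw [if_neg hca, ih _ hv']
      by_cases hka : k = a.1
      · subst hka
        simp [hca, hva]
      · have hmc : (k ∈ a.1 :: List.map Prod.fst t) = (k ∈ List.map Prod.fst t) := by
          simp [List.mem_cons, hka]
        rw [PySem.Dict.contains_insert, PySem.Dict.getD_insert]
        simp only [List.map_cons, hmc]
        simp [hka]

theorem pv_setd_keys {κ : Type} [BEq κ] [LawfulBEq κ] [DecidableEq κ]
    (l : List (κ × Int)) (c : PySem.Dict κ Int) :
    (l.foldl (fun nc kv => if nc.contains kv.1 then nc else nc.insert kv.1 kv.2) c).keys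
      = PySem.Set.update c.keys (l.map Prod.fst) := by
  induction l generalizing c with
  | nil => simp [PySem.Set.update]
  | cons a t ih =>
    rw [List.foldl_cons, List.map_cons]
    show _ = List.foldl PySem.Set.add (PySem.Set.add c.keys a.1) (t.map Prod.fst)
    by_cases hca : c.contains a.1
    · have hmem : a.1 ∈ c.keys := (PySem.Dict.contains_iff_mem_keys _ _).mp hca
      rw [if_pos hca, ih c]
      simp [PySem.Set.update, PySem.Set.add, PySem.Set.contains, hmem]
    · have hmem : a.1 ∉ c.keys := fun h => hca ((PySem.Dict.contains_iff_mem_keys _ _).mpr h)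
      rw [if_neg hca, ih]
      rw [PySem.Dict.keys_insert_of_not_contains _ _ (by simpa using hca)]
      simp [PySem.Set.update, PySem.Set.add, PySem.Set.contains, hmem]

-- the first inner loop of A's step (rebuild with added seq_price.get(sequence, 0))
theorem pv_ins_getD {κ : Type} [BEq κ] [LawfulBEq κ] [DecidableEq κ]
    (c d : PySem.Dict κ Int) (l : List (κ × Int)) (e : PySem.Dict κ Int) (k : κ)
    (hv : ∀ kv ∈ l, c.get? kv.1 = some kv.2) :
    (l.foldl (fun nc kv => nc.insert kv.1 (kv.2 + d.getD kv.1 0)) e).getD k 0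
      = if k ∈ l.map Prod.fst then c.getD k 0 + d.getD k 0 else e.getD k 0 := by
  induction l generalizing e with
  | nil => simp
  | cons a t ih =>
    have hv' : ∀ kv ∈ t, c.get? kv.1 = some kv.2 := fun kv h => hv kv (List.mem_cons_of_mem _ h)
    have hva : c.getD a.1 0 = a.2 := PySem.Dict.getD_of_get?_eq_some _ _ (hv a (by simp))
    rw [List.foldl_cons, ih _ hv']
    by_cases hkt : k ∈ t.map Prod.fst
    · simp [hkt]
    · by_cases hka : k = a.1
      · subst hka
        simp [hkt, hva]
      · simp [hkt, hka, PySem.Dict.getD_insert]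

-- A's whole step: keys become the updated key set, per-key totals add the new map's value
theorem pv_step_getD {κ : Type} [BEq κ] [LawfulBEq κ] [DecidableEq κ]
    (c d : PySem.Dict κ Int) (hc : c.keys.Nodup) (hd : d.keys.Nodup) (k : κ) :
    (d.items.foldl (fun nc kv => if nc.contains kv.1 then nc else nc.insert kv.1 kv.2)
      (c.items.foldl (fun nc kv => nc.insert kv.1 (kv.2 + d.getD kv.1 0))
        PySem.Dict.empty)).getD k 0 = c.getD k 0 + d.getD k 0 := by
  set nc1 := c.items.foldl (fun nc kv => nc.insert kv.1 (kv.2 + d.getD kv.1 0)) PySem.Dict.empty with hnc1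
  have hkeys1 : nc1.keys = c.keys := by
    rw [hnc1, PySem.Dict.keys_foldl_insert_key _ Prod.fst (fun nc kv => kv.2 + d.getD kv.1 0)]
    rw [PySem.Dict.keys_empty]
    show PySem.Set.ofList (c.items.map Prod.fst) = c.keys
    exact pvSet_ofList_nodup _ hc
  have hget1 : ∀ j, nc1.getD j 0 = if j ∈ c.keys then c.getD j 0 + d.getD j 0 else 0 := by
    intro j
    rw [hnc1, pv_ins_getD c d c.items PySem.Dict.empty j
      (fun kv h => PySem.Dict.get?_of_mem_items _ h hc)]
    simp [PySem.Dict.keys]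
  rw [pv_setd_getD d d.items nc1 k (fun kv h => PySem.Dict.get?_of_mem_items _ h hd)]
  have hcont1 : nc1.contains k = c.contains k := by
    rw [PySem.Dict.contains_eq_decide_mem_keys, PySem.Dict.contains_eq_decide_mem_keys, hkeys1]
  by_cases hck : c.contains k
  · have hmem : k ∈ c.keys := (PySem.Dict.contains_iff_mem_keys _ _).mp hck
    rw [hcont1, if_pos hck, hget1, if_pos hmem]
  · have hmem : k ∉ c.keys := fun h => hck ((PySem.Dict.contains_iff_mem_keys _ _).mpr h)
    have hc0 : c.getD k 0 = 0 := PySem.Dict.getD_of_not_contains _ _ (by simpa using hck)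
    rw [hcont1, if_neg hck, hget1, if_neg hmem, hc0]
    by_cases hkd : k ∈ d.items.map Prod.fst
    · simp [hkd]
    · have : d.contains k = false := by
        rw [PySem.Dict.contains_eq_decide_mem_keys]
        simpa [PySem.Dict.keys] using hkd
      simp [hkd, PySem.Dict.getD_of_not_contains _ _ this]

theorem pv_step_keys {κ : Type} [BEq κ] [LawfulBEq κ] [DecidableEq κ]
    (c d : PySem.Dict κ Int) (hc : c.keys.Nodup) :
    (d.items.foldl (fun nc kv => if nc.contains kv.1 then nc else nc.insert kv.1 kv.2)
      (c.items.foldl (fun nc kv => nc.insert kv.1 (kv.2 + d.getD kv.1 0))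
        PySem.Dict.empty)).keys = PySem.Set.update c.keys d.keys := by
  rw [pv_setd_keys]
  have hkeys1 : (c.items.foldl (fun nc kv => nc.insert kv.1 (kv.2 + d.getD kv.1 0))
      PySem.Dict.empty).keys = c.keys := by
    rw [PySem.Dict.keys_foldl_insert_key _ Prod.fst (fun nc kv => kv.2 + d.getD kv.1 0)]
    rw [PySem.Dict.keys_empty]
    show PySem.Set.ofList (c.items.map Prod.fst) = c.keys
    exact pvSet_ofList_nodup _ hc
  rw [hkeys1]
  rfl

-- A's outer loop: keys chain-update, per-key totals accumulate
theorem pv_loop {κ : Type} [BEq κ] [LawfulBEq κ] [DecidableEq κ]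
    (L : List (PySem.Dict κ Int)) (c : PySem.Dict κ Int) (hc : c.keys.Nodup)
    (hL : ∀ d ∈ L, d.keys.Nodup) :
    (L.foldl (fun combined seq_price =>
        seq_price.items.foldl (fun nc kv => if nc.contains kv.1 then nc else nc.insert kv.1 kv.2)
          (combined.items.foldl (fun nc kv => nc.insert kv.1 (kv.2 + seq_price.getD kv.1 0))
            PySem.Dict.empty)) c).keys
        = L.foldl (fun s d => PySem.Set.update s d.keys) c.keys
    ∧ (L.foldl (fun combined seq_price =>
        seq_price.items.foldl (fun nc kv => if nc.contains kv.1 then nc else nc.insert kv.1 kv.2)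
          (combined.items.foldl (fun nc kv => nc.insert kv.1 (kv.2 + seq_price.getD kv.1 0))
            PySem.Dict.empty)) c).keys.Nodup
    ∧ ∀ k, (L.foldl (fun combined seq_price =>
        seq_price.items.foldl (fun nc kv => if nc.contains kv.1 then nc else nc.insert kv.1 kv.2)
          (combined.items.foldl (fun nc kv => nc.insert kv.1 (kv.2 + seq_price.getD kv.1 0))
            PySem.Dict.empty)) c).getD k 0
        = L.foldl (fun acc d => acc + d.getD k 0) (c.getD k 0) := by
  induction L generalizing c with
  | nil => exact ⟨rfl, hc, fun k => rfl⟩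
  | cons d t ih =>
    have hd : d.keys.Nodup := hL d (by simp)
    have ht : ∀ d' ∈ t, d'.keys.Nodup := fun d' h => hL d' (List.mem_cons_of_mem _ h)
    have hck : (d.items.foldl (fun nc kv => if nc.contains kv.1 then nc else nc.insert kv.1 kv.2)
        (c.items.foldl (fun nc kv => nc.insert kv.1 (kv.2 + d.getD kv.1 0))
          PySem.Dict.empty)).keys = PySem.Set.update c.keys d.keys := pv_step_keys c d hc
    have hcn : (d.items.foldl (fun nc kv => if nc.contains kv.1 then nc else nc.insert kv.1 kv.2)
        (c.items.foldl (fun nc kv => nc.insert kv.1 (kv.2 + d.getD kv.1 0))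
          PySem.Dict.empty)).keys.Nodup := by rw [hck]; exact pvSet_update_nodup _ _ hc
    obtain ⟨ih1, ih2, ih3⟩ := ih _ hcn ht
    refine ⟨?_, ih2, ?_⟩
    · rw [List.foldl_cons, ih1, hck, List.foldl_cons]
    · intro k
      rw [List.foldl_cons, ih3 k, pv_step_getD c d hc hd k, List.foldl_cons]

theorem pvToDict_nodup (l : List (Int × Int × Int × Int × Int)) : (pvToDict l).keys.Nodup := by
  unfold pvToDict
  exact PySem.Dict.nodup_keys_foldl_insert_key l pvKey (fun d p => pvVal p) _
    PySem.Dict.nodup_keys_empty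

-- ===== VERDICT (by name: the statement is the Claim_ definition above) =====
theorem best_price_spec : Claim_equal_best_price := by
  intro sp _hdom hpre
  unfold Spec_best_price
  cases sp with
  | nil => exact absurd rfl hpre.1
  | cons l0 ls =>
    simp only [best_price, best_price_alt, List.map_cons]
    have hd0 : (pvToDict l0).keys.Nodup := pvToDict_nodup l0
    have hR : ∀ d ∈ ls.map pvToDict, d.keys.Nodup := by
      intro d hd
      obtain ⟨l, _, rfl⟩ := List.mem_map.mp hd
      exact pvToDict_nodup l
    obtain ⟨hkeys, hnd, hgetD⟩ := pv_loop (ls.map pvToDict) (pvToDict l0) hd0 hR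
    rw [PySem.Dict.values_eq_map_keys _ hnd 0, hkeys]
    rw [pvSet_ofList_nodup _ hd0]
    congr 2
    apply List.map_congr_left
    intro k _
    rw [hgetD k, List.foldl_cons, zero_add]
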